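-- pv_equiv track=rewrite | github.com/thealper2/codewars-solutions | 7-kyu/smallest_transform.py | smallest_transform
-- ===== SOURCE A (Python) =====
-- def smallest_transform(num):
--     s = str(num)
--     min_total = float('inf')
--
--     for digit in range(10):
--         total = 0
--         for c in s:
--             d = int(c)
--             total += abs(d - digit)
--
--         if total < min_total:
--             min_total = total
--
--     return min_total
-- ===== SOURCE B (Python) =====
-- def smallest_transform(num):
--     digits = [int(c) for c in str(num)]
--     digits.sort()
--     m = digits[len(digits) // 2]
--     return sum(abs(d - m) for d in digits)
-- ===== Notes on version B (the rewrite author's own statement) =====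
-- stated objective: simpler
-- what changed: Replaces the brute-force scan over every candidate target digit by sorting the digit list once and summing absolute deviations from the median digit (the median minimizes total absolute deviation).
import Mathlib
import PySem

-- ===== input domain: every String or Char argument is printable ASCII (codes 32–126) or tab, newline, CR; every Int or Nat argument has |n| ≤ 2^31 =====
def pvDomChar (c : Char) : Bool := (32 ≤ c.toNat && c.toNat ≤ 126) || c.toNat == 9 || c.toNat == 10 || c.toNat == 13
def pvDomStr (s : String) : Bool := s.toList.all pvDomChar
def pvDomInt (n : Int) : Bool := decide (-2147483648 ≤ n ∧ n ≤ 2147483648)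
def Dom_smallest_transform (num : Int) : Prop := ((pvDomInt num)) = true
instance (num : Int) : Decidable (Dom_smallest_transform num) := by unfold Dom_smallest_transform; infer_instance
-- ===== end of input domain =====

-- B replaces A's 10-target brute-force scan by sorting the digits once and summing
-- absolute deviations from the median digit (objective: simpler).

-- ===== PORT A =====
-- int(c) for a single char; PySem.Int.ofChars? is none exactly where Python's int()
-- raises ValueError — under Pre_ (num ≥ 0) every char is a digit and the default is unreachable.
def pvIntOfChar (c : Char) : Int := (PySem.Int.ofChars? [c]).getD 0

-- 'if total < min_total: min_total = total' with min_total = float('inf') as none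
def pvMinUpd (mt : Option Int) (total : Int) : Option Int :=
  match mt with
  | none => some total
  | some m => if total < m then some total else some m

def smallest_transform (num : Int) : Int :=
  let s := PySem.Int.toChars num
  let r := (PySem.List.pyRange 0 10 1).foldl
    (fun mt digit =>
      let total := s.foldl (fun t c => t + |pvIntOfChar c - digit|) 0
      pvMinUpd mt total) none
  -- range(10) is nonempty, so min_total is an int here; the getD 0 default is unreachable
  r.getD 0

-- ===== PORT B =====
def smallest_transform_alt (num : Int) : Int :=
  let digits := (PySem.Int.toChars num).map pvIntOfChar
  let ds := PySem.List.sorted digits (fun x => x) false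
  let m := PySem.List.pyGetD ds (PySem.Int.floordiv (PySem.List.len ds) 2) 0
  (ds.map (fun d => |d - m|)).sum

-- ===== PRECONDITION & SPEC =====
-- Pre_ excludes num < 0, where str(num) starts with '-' and int('-') raises ValueError in A (and in B).
def Pre_smallest_transform (num : Int) : Prop := 0 ≤ num
instance (num : Int) : Decidable (Pre_smallest_transform num) := by unfold Pre_smallest_transform; infer_instance
def pvWitness_smallest_transform : Int := 271

def Spec_smallest_transform (num : Int) (out : Int) : Prop := out = smallest_transform_alt num
instance (num : Int) (out : Int) : Decidable (Spec_smallest_transform num out) := by unfold Spec_smallest_transform; infer_instance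

-- ===== CLAIM (what is proved, stated in full; the proofs are below) =====
def Claim_equal_smallest_transform : Prop := ∀ (num : Int), Dom_smallest_transform num → Pre_smallest_transform num → Spec_smallest_transform num (smallest_transform num)

-- ===== LEMMAS AND PROOFS =====

-- total transform cost of a digit list towards target t
def pvCost (l : List Int) (t : Int) : Int := (l.map (fun d => |d - t|)).sum

lemma pvCost_cons (x : Int) (l : List Int) (t : Int) :
    pvCost (x :: l) t = |x - t| + pvCost l t := by simp [pvCost]

lemma pvCost_append (l₁ l₂ : List Int) (t : Int) :
    pvCost (l₁ ++ l₂) t = pvCost l₁ t + pvCost l₂ t := by simp [pvCost]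

lemma pvCost_single (b t : Int) : pvCost [b] t = |b - t| := by simp [pvCost]

lemma pvCost_perm (l l' : List Int) (h : l.Perm l') (t : Int) : pvCost l t = pvCost l' t :=
  (h.map _).sum_eq

-- every char str emits for a nonnegative int is a digit char
lemma toDigitsCore_mem (fuel n : Nat) (ds : List Char) (c : Char)
    (h : c ∈ Nat.toDigitsCore 10 fuel n ds) :
    c ∈ ds ∨ ∃ d : Nat, d < 10 ∧ c = Nat.digitChar d := by
  induction fuel generalizing n ds with
  | zero => exact Or.inl h
  | succ fuel ih =>
    simp only [Nat.toDigitsCore] at h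
    split at h
    · rw [List.mem_cons] at h
      rcases h with rfl | h
      · exact Or.inr ⟨n % 10, Nat.mod_lt _ (by omega), rfl⟩
      · exact Or.inl h
    · rcases ih _ _ h with h' | h'
      · rw [List.mem_cons] at h'
        rcases h' with rfl | h'
        · exact Or.inr ⟨n % 10, Nat.mod_lt _ (by omega), rfl⟩
        · exact Or.inl h'
      · exact Or.inr h'

lemma toDigitsCore_ne_nil (fuel n : Nat) (ds : List Char)
    (h : fuel ≠ 0 ∨ ds ≠ []) : Nat.toDigitsCore 10 fuel n ds ≠ [] := by
  induction fuel generalizing n ds with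
  | zero => simpa [Nat.toDigitsCore] using h.resolve_left (by simp)
  | succ fuel ih =>
    simp only [Nat.toDigitsCore]
    split
    · simp
    · exact ih _ _ (Or.inr (by simp))

lemma pvIntOfChar_digit (d : Nat) (hd : d < 10) :
    pvIntOfChar (Nat.digitChar d) = (d : Int) := by
  interval_cases d <;> decide

lemma digits_bounds (num : Int) (h : 0 ≤ num) :
    ∀ x ∈ (PySem.Int.toChars num).map pvIntOfChar, 0 ≤ x ∧ x ≤ 9 := by
  intro x hx
  rcases List.mem_map.1 hx with ⟨c, hc, rfl⟩
  have : c ∈ Nat.toDigits 10 num.toNat := by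
    simpa [PySem.Int.toChars, not_lt.2 h] using hc
  rcases toDigitsCore_mem _ _ _ _ this with h' | ⟨d, hd, rfl⟩
  · simp at h'
  · rw [pvIntOfChar_digit d hd]; omega

lemma digits_ne_nil (num : Int) :
    (PySem.Int.toChars num).map pvIntOfChar ≠ [] := by
  simp only [ne_eq, List.map_eq_nil_iff]
  unfold PySem.Int.toChars
  split
  · simp
  · exact toDigitsCore_ne_nil _ _ _ (Or.inl (by omega))

-- the median of a sorted list minimizes the total absolute deviation
lemma cost_median_le : ∀ (n : Nat) (l : List Int), l.length = n →
    l.Pairwise (· ≤ ·) → ∀ t : Int, pvCost l (l.getD (l.length / 2) 0) ≤ pvCost l t := by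
  intro n
  induction n using Nat.strong_induction_on with
  | _ n ih =>
    intro l hlen hs t
    match l, hlen with
    | [], _ => simp [pvCost]
    | [a], _ =>
      have h0 : ([a] : List Int).getD (([a] : List Int).length / 2) 0 = a := by simp
      rw [h0, pvCost_single, pvCost_single]
      simp only [sub_self, abs_zero]
      positivity
    | (a :: x :: rs), hlen =>
      have hrest : (x :: rs : List Int) ≠ [] := by simp
      obtain ⟨m, b, hmb⟩ : ∃ (m : List Int) (bb : Int), (x :: rs : List Int) = m ++ [bb] :=
        ⟨(x :: rs).dropLast, (x :: rs).getLast hrest, (List.dropLast_append_getLast hrest).symm⟩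
      rw [hmb] at hs hlen ⊢
      rcases List.pairwise_cons.1 hs with ⟨ha, hmb_pw⟩
      rcases List.pairwise_append.1 hmb_pw with ⟨hm_pw, -, hmble⟩
      have hlen2 : (a :: (m ++ [b])).length = m.length + 2 := by simp
      have hidx : (a :: (m ++ [b])).length / 2 = m.length / 2 + 1 := by rw [hlen2]; omega
      rw [hidx, List.getD_cons_succ]
      have h1 : t - a ≤ |a - t| := by rw [abs_sub_comm]; exact le_abs_self _
      have h2 : b - t ≤ |b - t| := le_abs_self _
      by_cases hm : m = []
      · subst hm
        simp only [List.nil_append, List.length_nil, Nat.zero_div, List.getD_cons_zero]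
        have hab : a ≤ b := ha b (by simp)
        have h3 : |a - b| = b - a := by
          rw [abs_sub_comm]; exact abs_of_nonneg (by omega)
        have h4 : |b - b| = (0 : Int) := by simp
        simp only [pvCost, List.map_cons, List.map_nil, List.sum_cons, List.sum_nil, add_zero]
        omega
      · have hmlen : m.length ≠ 0 := fun h => hm (List.eq_nil_of_length_eq_zero h)
        have hidx2 : m.length / 2 < m.length := Nat.div_lt_self (by omega) (by omega)
        rw [List.getD_append _ _ _ _ hidx2]
        have hem : m.getD (m.length / 2) 0 ∈ m := by
          rw [List.getD_eq_getElem _ _ hidx2]; exact List.getElem_mem _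
        set e := m.getD (m.length / 2) 0 with he
        have hae : a ≤ e := ha e (List.mem_append_left _ hem)
        have heb : e ≤ b := hmble e hem b (by simp)
        have hIH : pvCost m e ≤ pvCost m t := by
          have := ih m.length (by omega) m rfl hm_pw t
          rwa [← he] at this
        have h3 : |a - e| = e - a := by
          rw [abs_sub_comm]; exact abs_of_nonneg (by omega)
        have h4 : |b - e| = b - e := abs_of_nonneg (by omega)
        rw [pvCost_cons, pvCost_cons, pvCost_append, pvCost_append,
            pvCost_single, pvCost_single, h3, h4]
        omega

-- the Option-min fold of A, once seeded, is a plain min fold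
lemma pvMinUpd_some (m tt : Int) : pvMinUpd (some m) tt = some (min tt m) := by
  have h0 : pvMinUpd (some m) tt = if tt < m then some tt else some m := rfl
  rw [h0]
  split_ifs with h
  · rw [min_eq_left (le_of_lt h)]
  · rw [min_eq_right (not_lt.1 h)]

lemma foldl_minUpd (l : List Int) (f : Int → Int) (m : Int) :
    l.foldl (fun mt t => pvMinUpd mt (f t)) (some m)
      = some (l.foldl (fun a t => min (f t) a) m) := by
  induction l generalizing m with
  | nil => rfl
  | cons x xs ihl =>
    simp only [List.foldl_cons, pvMinUpd_some]
    exact ihl (min (f x) m)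

lemma foldl_min_le_init (l : List Int) (f : Int → Int) (m : Int) :
    l.foldl (fun a t => min (f t) a) m ≤ m := by
  induction l generalizing m with
  | nil => simp
  | cons x xs ihl =>
    simp only [List.foldl_cons]
    exact le_trans (ihl (min (f x) m)) (min_le_right _ _)

lemma foldl_min_le_mem (l : List Int) (f : Int → Int) (m x : Int) :
    x ∈ l → l.foldl (fun a t => min (f t) a) m ≤ f x := by
  induction l generalizing m with
  | nil => intro hx; simp at hx
  | cons y ys ihl =>
    intro hx
    simp only [List.foldl_cons]
    rcases List.mem_cons.1 hx with rfl | hx'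
    · exact le_trans (foldl_min_le_init _ _ _) (min_le_left _ _)
    · exact ihl _ hx'

lemma le_foldl_min (l : List Int) (f : Int → Int) (m c : Int) :
    c ≤ m → (∀ x ∈ l, c ≤ f x) → c ≤ l.foldl (fun a t => min (f t) a) m := by
  induction l generalizing m with
  | nil => intro hc _; simpa using hc
  | cons x xs ihl =>
    intro hc hl
    simp only [List.foldl_cons]
    exact ihl _ (le_min (hl x (by simp)) hc) (fun y hy => hl y (by simp [hy]))

lemma foldl_add_abs (s : List Char) (digit : Int) (init : Int) :
    s.foldl (fun t c => t + |pvIntOfChar c - digit|) init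
      = init + pvCost (s.map pvIntOfChar) digit := by
  induction s generalizing init with
  | nil => simp [pvCost]
  | cons c cs ihs =>
    simp only [List.foldl_cons, List.map_cons, pvCost_cons, ihs]
    ring

-- ===== VERDICT (by name: the statement is the Claim_ definition above) =====
theorem smallest_transform_spec : Claim_equal_smallest_transform := by
  intro num _ hpre
  show smallest_transform num = smallest_transform_alt num
  simp only [smallest_transform, smallest_transform_alt]
  rw [show PySem.List.pyRange 0 10 1 = [0, 1, 2, 3, 4, 5, 6, 7, 8, 9] from by decide]
  set L : List Int := (PySem.Int.toChars num).map pvIntOfChar with hL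
  set ds : List Int := PySem.List.sorted L (fun x => x) false with hds
  have hperm : ds.Perm L := PySem.List.sorted_perm _ _ _
  have hds_ne : ds ≠ [] := by
    rw [hds, ne_eq, PySem.List.sorted_eq_nil_iff]
    exact digits_ne_nil num
  have hpw : ds.Pairwise (· ≤ ·) := PySem.List.sorted_pairwise _ _
  have hidx3 : ds.length / 2 < ds.length :=
    Nat.div_lt_self (Nat.pos_of_ne_zero (fun h => hds_ne (List.eq_nil_of_length_eq_zero h))) (by omega)
  have hmidx : PySem.List.pyGetD ds (PySem.Int.floordiv (PySem.List.len ds) 2) 0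
      = ds.getD (ds.length / 2) 0 := by
    rw [PySem.List.len_eq]
    have h2 : PySem.Int.floordiv ((ds.length : Int)) 2 = ((ds.length / 2 : Nat) : Int) := by
      exact_mod_cast PySem.Int.floordiv_natCast ds.length 2
    rw [h2, PySem.List.pyGetD_natCast]
  rw [hmidx]
  set μ : Int := ds.getD (ds.length / 2) 0 with hμ
  have hμmem : μ ∈ ds := by rw [hμ, List.getD_eq_getElem _ _ hidx3]; exact List.getElem_mem _
  have hμb : 0 ≤ μ ∧ μ ≤ 9 := digits_bounds num hpre μ (hperm.mem_iff.1 hμmem)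
  have hcost : ∀ t : Int, pvCost ds t = pvCost L t := fun t => pvCost_perm _ _ hperm t
  have hmed : ∀ t : Int, pvCost L μ ≤ pvCost L t := by
    intro t
    rw [← hcost, ← hcost]
    exact cost_median_le ds.length ds rfl hpw t
  have hRHS : (ds.map (fun d => |d - μ|)).sum = pvCost L μ := hcost μ
  rw [hRHS]
  simp only [foldl_add_abs, zero_add]
  rw [← hL]
  rw [List.foldl_cons]
  rw [show pvMinUpd none (pvCost L 0) = some (pvCost L 0) from rfl]
  rw [foldl_minUpd]
  rw [Option.getD_some]
  apply le_antisymm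
  · by_cases h0 : μ = 0
    · rw [h0]
      exact foldl_min_le_init _ _ _
    · have hmem9 : μ ∈ ([1, 2, 3, 4, 5, 6, 7, 8, 9] : List Int) := by
        simp only [List.mem_cons, List.not_mem_nil, or_false]
        omega
      exact foldl_min_le_mem _ _ _ _ hmem9
  · exact le_foldl_min _ _ _ _ (hmed 0) (fun x _ => hmed x)
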